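-- pv_equiv track=rewrite | github.com/Saad-Ayady/dyBlack404 | lib/decode.py | encode_UTF8_unicode_trea
-- ===== SOURCE A (Python) =====
-- def encode_UTF8_unicode_trea(string):
--     new_data = ""
--     start = 0
--     while start < len(string) :
--         if string[start] == ".":
--             new_data += "%c0ae"
--         elif string[start] == "/":
--             new_data += "%c0%2f"
--         elif string[start] == "\\" :
--             new_data += "%c0%80%5c"
--         else :
--             new_data += string[start]
--         start += 1
--     return new_data
-- ===== SOURCE B (Python) =====
-- def encode_UTF8_unicode_trea(string):
--     string = string.replace(".", "%c0ae")
--     string = string.replace("/", "%c0%2f")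
--     string = string.replace("\\", "%c0%80%5c")
--     return string
-- ===== Notes on version B (the rewrite author's own statement) =====
-- stated objective: faster
-- what changed: Replaced the index-driven while loop with per-character concatenation by three staged whole-string str.replace passes, one per escaped character; correct because no replacement string contains a character targeted by a later pass.
import Mathlib
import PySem

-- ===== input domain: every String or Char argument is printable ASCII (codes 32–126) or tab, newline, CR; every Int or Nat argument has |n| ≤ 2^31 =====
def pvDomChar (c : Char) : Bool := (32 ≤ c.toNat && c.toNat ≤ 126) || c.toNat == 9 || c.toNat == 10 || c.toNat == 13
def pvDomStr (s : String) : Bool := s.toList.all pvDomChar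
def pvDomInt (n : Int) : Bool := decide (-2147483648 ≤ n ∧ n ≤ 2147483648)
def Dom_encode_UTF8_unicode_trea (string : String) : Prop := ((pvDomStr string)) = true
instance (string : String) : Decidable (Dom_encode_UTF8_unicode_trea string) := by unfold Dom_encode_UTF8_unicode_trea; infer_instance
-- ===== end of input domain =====

-- B replaces A's index-driven while loop (per-character if/elif with manual concatenation)
-- by three staged whole-string str.replace passes, one per escaped character.

-- ===== PORT A =====
-- the while loop over 'start', appending to 'new_data'; one step per character
def pvTreaLoop (new_data : String) : List Char → String
  | [] => new_data
  | c :: rest =>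
      if c = '.' then pvTreaLoop (new_data ++ "%c0ae") rest
      else if c = '/' then pvTreaLoop (new_data ++ "%c0%2f") rest
      else if c = '\\' then pvTreaLoop (new_data ++ "%c0%80%5c") rest
      else pvTreaLoop (new_data ++ String.singleton c) rest

def encode_UTF8_unicode_trea (string : String) : String :=
  pvTreaLoop "" string.toList

-- ===== PORT B =====
-- three staged str.replace passes, exactly as in Source B
def encode_UTF8_unicode_trea_alt (string : String) : String :=
  PySem.Str.replace (PySem.Str.replace (PySem.Str.replace string "." "%c0ae") "/" "%c0%2f") "\\" "%c0%80%5c"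

-- ===== PRECONDITION & SPEC =====
def Spec_encode_UTF8_unicode_trea (string : String) (out : String) : Prop := out = encode_UTF8_unicode_trea_alt string
instance (string : String) (out : String) : Decidable (Spec_encode_UTF8_unicode_trea string out) := by unfold Spec_encode_UTF8_unicode_trea; infer_instance

-- ===== CLAIM =====
def Claim_equal_encode_UTF8_unicode_trea : Prop := ∀ (string : String), Dom_encode_UTF8_unicode_trea string → Spec_encode_UTF8_unicode_trea string (encode_UTF8_unicode_trea string)

-- ===== LEMMAS AND PROOFS =====

-- substituting one character by a fixed string, pointwise
def pvSubst (p : Char) (new : List Char) (c : Char) : List Char :=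
  if c = p then new else [c]

-- the per-character effect of A's if/elif chain
def pvTreaChar (c : Char) : List Char :=
  if c = '.' then "%c0ae".toList
  else if c = '/' then "%c0%2f".toList
  else if c = '\\' then "%c0%80%5c".toList
  else [c]

theorem pvGo_single (p : Char) (new : List Char) :
    ∀ (l : List Char) (fuel : Nat) (acc : List Char), l.length ≤ fuel →
      PySem.Chars.replace.go [p] new fuel l acc = acc.reverse ++ l.flatMap (pvSubst p new) := by
  intro l
  induction l with
  | nil => intro fuel acc _; cases fuel <;> simp [PySem.Chars.replace.go]
  | cons c t ih =>
    intro fuel acc h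
    cases fuel with
    | zero => simp at h
    | succ n =>
      rw [List.length_cons] at h
      by_cases hc : c = p
      · subst hc
        have hpre : [c].isPrefixOf (c :: t) = true := by simp [List.isPrefixOf]
        simp only [PySem.Chars.replace.go, hpre, if_pos, List.length_cons, List.length_nil,
          Nat.zero_add, List.drop_succ_cons, List.drop_zero]
        rw [ih n (new.reverse ++ acc) (by omega)]
        simp [pvSubst]
      · have hpre : [p].isPrefixOf (c :: t) = false := by
          simp [List.isPrefixOf, beq_eq_false_iff_ne]
          exact fun h' => hc h'.symm
        simp only [PySem.Chars.replace.go, hpre, Bool.false_eq_true, if_false]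
        rw [ih n (c :: acc) (by omega)]
        simp [pvSubst, hc]

theorem pvReplace_single (s : List Char) (p : Char) (new : List Char) :
    PySem.Chars.replace s [p] new = s.flatMap (pvSubst p new) := by
  rw [PySem.Chars.replace]
  simp only [List.isEmpty_cons, Bool.false_eq_true, if_false]
  exact pvGo_single p new s s.length [] (le_refl _)

theorem pvFlatMap_flatMap {α : Type} (l : List α) (f g : α → List α) :
    (l.flatMap f).flatMap g = l.flatMap (fun c => (f c).flatMap g) := by
  induction l with
  | nil => rfl
  | cons x xs ih => simp [List.flatMap_cons, ih]

theorem pvChar_key (c : Char) :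
    (pvSubst '.' "%c0ae".toList c).flatMap
      (fun d => (pvSubst '/' "%c0%2f".toList d).flatMap (pvSubst '\\' "%c0%80%5c".toList))
      = pvTreaChar c := by
  by_cases h1 : c = '.'
  · subst h1; decide
  · by_cases h2 : c = '/'
    · subst h2; decide
    · by_cases h3 : c = '\\'
      · subst h3; decide
      · simp [pvSubst, pvTreaChar, h1, h2, h3]

theorem pvTreaLoop_eq (l : List Char) (acc : String) :
    (pvTreaLoop acc l).toList = acc.toList ++ l.flatMap pvTreaChar := by
  induction l generalizing acc with
  | nil => simp [pvTreaLoop]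
  | cons c rest ih =>
    simp only [pvTreaLoop]
    split_ifs with h1 h2 h3 <;> rw [ih] <;> simp [pvTreaChar, *]

theorem encode_UTF8_unicode_trea_spec : Claim_equal_encode_UTF8_unicode_trea := by
  intro s _
  unfold Spec_encode_UTF8_unicode_trea encode_UTF8_unicode_trea encode_UTF8_unicode_trea_alt
  apply String.ext
  rw [pvTreaLoop_eq]
  simp only [PySem.Str.toList_replace]
  have e1 : (".":String).toList = ['.'] := rfl
  have e2 : ("/":String).toList = ['/'] := rfl
  have e3 : ("\\":String).toList = ['\\'] := rfl
  rw [e1, e2, e3, pvReplace_single, pvReplace_single, pvReplace_single,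
    pvFlatMap_flatMap, pvFlatMap_flatMap]
  simp only [pvChar_key]
  simp
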